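-- pv_equiv track=rewrite | github.com/koukoulala/enas_nlp_nni | NAS/src/enasnlp/data_utils.py | get_word_id_dict
-- ===== SOURCE A (Python) =====
-- def get_word_id_dict(word_num_dict, word_id_dict, min_count):
--   for word in word_num_dict:
--     count = word_num_dict[word]
--     if count >= min_count:
--       index = len(word_id_dict)
--       if word not in word_id_dict:
--         word_id_dict[word] = index
--   return word_id_dict
-- ===== SOURCE B (Python) =====
-- def get_word_id_dict(word_num_dict, word_id_dict, min_count):
--   orig = set(word_id_dict)
--   base = len(word_id_dict)
--   items = list(word_num_dict.items())
--   for i, (word, count) in enumerate(items):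
--     if count >= min_count and word not in orig:
--       rank = sum(1 for w, c in items[:i] if c >= min_count and w not in orig)
--       word_id_dict[word] = base + rank
--   return word_id_dict
-- ===== Notes on version B (the rewrite author's own statement) =====
-- stated objective: alternative
-- what changed: Instead of A's stateful pass that derives each new id from the growing dict's current length, B snapshots the original key set and computes every qualifying word's id independently and statelessly as base + (number of qualifying new words strictly before it in word_num_dict), a rank-counting formulation; it trades A's O(n) single pass for an O(n^2) per-word count. Same dict mutated in place.
import Mathlib
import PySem

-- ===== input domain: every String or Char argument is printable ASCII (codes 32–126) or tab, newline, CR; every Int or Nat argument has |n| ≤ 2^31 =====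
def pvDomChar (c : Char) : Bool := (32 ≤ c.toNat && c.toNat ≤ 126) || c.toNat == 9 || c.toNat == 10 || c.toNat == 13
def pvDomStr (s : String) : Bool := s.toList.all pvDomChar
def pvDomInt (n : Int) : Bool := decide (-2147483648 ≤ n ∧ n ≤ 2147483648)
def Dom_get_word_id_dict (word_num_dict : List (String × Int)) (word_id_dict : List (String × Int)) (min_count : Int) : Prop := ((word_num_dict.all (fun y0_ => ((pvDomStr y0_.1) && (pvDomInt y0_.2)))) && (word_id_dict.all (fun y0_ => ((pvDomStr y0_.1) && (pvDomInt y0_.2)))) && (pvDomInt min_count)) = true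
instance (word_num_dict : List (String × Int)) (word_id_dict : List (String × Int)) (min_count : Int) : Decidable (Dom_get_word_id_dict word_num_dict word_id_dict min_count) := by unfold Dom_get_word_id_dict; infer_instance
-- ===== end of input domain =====

-- B replaces A's stateful pass (each new id read off the growing dict's current length) by a
-- stateless rank computation: snapshot the original key set, and give each qualifying new word
-- the id base + (number of qualifying new words strictly before it); an alternative O(n^2)
-- formulation of the same mapping. Both mutate word_id_dict in place in Python; the equivalence
-- proved here is about the returned mapping (which is that same dict).

-- ===== PORT A =====
def get_word_id_dict (word_num_dict : List (String × Int)) (word_id_dict : List (String × Int)) (min_count : Int) : List (String × Int) :=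
  ((PySem.Dict.mk word_num_dict).keys.foldl
    (fun (d : PySem.Dict String Int) (word : String) =>
      let count : Int := (PySem.Dict.mk word_num_dict).getD word 0
      if count ≥ min_count then
        let index : Int := d.size
        if d.contains word = false then d.insert word index else d
      else d)
    (PySem.Dict.mk word_id_dict)).items

-- ===== PORT B =====
def get_word_id_dict_alt (word_num_dict : List (String × Int)) (word_id_dict : List (String × Int)) (min_count : Int) : List (String × Int) :=
  let orig : PySem.Set String := PySem.Set.ofList ((PySem.Dict.mk word_id_dict).keys)
  let base : Int := (PySem.Dict.mk word_id_dict).size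
  let items : List (String × Int) := (PySem.Dict.mk word_num_dict).items
  ((PySem.List.enumerate items 0).foldl
    (fun (d : PySem.Dict String Int) (q : Int × (String × Int)) =>
      if decide (q.2.2 ≥ min_count) && !(PySem.Set.contains orig q.2.1) then
        let rank : Int :=
          (((PySem.List.slice items (some 0) (some q.1)).filter
              (fun p => decide (p.2 ≥ min_count) && !(PySem.Set.contains orig p.1))).map
            (fun _ => (1 : Int))).sum
        d.insert q.2.1 (base + rank)
      else d)
    (PySem.Dict.mk word_id_dict)).items

-- ===== PRECONDITION & SPEC =====
-- Pre_ requires distinct keys in each association list: both list arguments represent Python dicts,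
-- whose keys are necessarily distinct, so duplicate-key lists correspond to no Python input.
def Pre_get_word_id_dict (word_num_dict : List (String × Int)) (word_id_dict : List (String × Int)) (min_count : Int) : Prop :=
  (word_num_dict.map Prod.fst).Nodup ∧ (word_id_dict.map Prod.fst).Nodup
instance (word_num_dict : List (String × Int)) (word_id_dict : List (String × Int)) (min_count : Int) : Decidable (Pre_get_word_id_dict word_num_dict word_id_dict min_count) := by unfold Pre_get_word_id_dict; infer_instance

def pvWitness_get_word_id_dict : (List (String × Int)) × (List (String × Int)) × Int :=
  ([("a", 3), ("b", 1), ("x", 5)], [("x", 0)], 2)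

def Spec_get_word_id_dict (word_num_dict : List (String × Int)) (word_id_dict : List (String × Int)) (min_count : Int) (out : List (String × Int)) : Prop := out = get_word_id_dict_alt word_num_dict word_id_dict min_count
instance (word_num_dict : List (String × Int)) (word_id_dict : List (String × Int)) (min_count : Int) (out : List (String × Int)) : Decidable (Spec_get_word_id_dict word_num_dict word_id_dict min_count out) := by unfold Spec_get_word_id_dict; infer_instance

-- ===== CLAIM (what is proved, stated in full; the proofs are below) =====
def Claim_equal_get_word_id_dict : Prop := ∀ (word_num_dict : List (String × Int)) (word_id_dict : List (String × Int)) (min_count : Int), Dom_get_word_id_dict word_num_dict word_id_dict min_count → Pre_get_word_id_dict word_num_dict word_id_dict min_count → Spec_get_word_id_dict word_num_dict word_id_dict min_count (get_word_id_dict word_num_dict word_id_dict min_count)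

-- ===== LEMMAS AND PROOFS =====

-- inserting a list of fresh words, each at the current size
def pvInsertFresh (d : PySem.Dict String Int) (ws : List String) : PySem.Dict String Int :=
  ws.foldl (fun d w => d.insert w (d.size : Int)) d

-- orig (the snapshot set of wid's keys) answers membership like the dict itself
theorem pv_orig_contains (wid : List (String × Int)) (w : String) :
    PySem.Set.contains (PySem.Set.ofList ((PySem.Dict.mk wid).keys)) w = (PySem.Dict.mk wid).contains w := by
  rw [Bool.eq_iff_iff]
  simp [pysem, PySem.Set.mem_ofList]

-- core invariant for A: the stateful pass over l equals pvInsertFresh of the filtered new words,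
-- provided the evolving dict agrees with the original on l's (distinct) keys
theorem pv_core (W : PySem.Dict String Int) (m : Int) (cnt : String → Int) :
    ∀ (l : List (String × Int)) (d : PySem.Dict String Int),
    (l.map Prod.fst).Nodup →
    (∀ p ∈ l, cnt p.1 = p.2) →
    (∀ p ∈ l, d.contains p.1 = W.contains p.1) →
    l.foldl (fun d p =>
        if cnt p.1 ≥ m then
          (if d.contains p.1 = false then d.insert p.1 (d.size : Int) else d)
        else d) d
      = pvInsertFresh d ((l.filter (fun p => decide (p.2 ≥ m) && !(W.contains p.1))).map Prod.fst) := by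
  intro l
  induction l with
  | nil => intro d _ _ _; simp [pvInsertFresh]
  | cons p l ih =>
    intro d hnd hcnt hagree
    have hcp : cnt p.1 = p.2 := hcnt p (List.mem_cons_self ..)
    have hap : d.contains p.1 = W.contains p.1 := hagree p (List.mem_cons_self ..)
    rw [List.map_cons, List.nodup_cons] at hnd
    obtain ⟨hpnotin, hndl⟩ := hnd
    simp only [List.foldl_cons, List.filter_cons]
    by_cases hm : p.2 ≥ m
    · by_cases hc : W.contains p.1 = true
      · have hA : (if cnt p.1 ≥ m then (if d.contains p.1 = false then d.insert p.1 (d.size : Int) else d) else d) = d := by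
          rw [hcp, if_pos hm, hap, hc]; simp
        have hF : (decide (p.2 ≥ m) && !(W.contains p.1)) = false := by simp [hc]
        rw [hA, hF, if_neg (by simp)]
        exact ih d hndl (fun q hq => hcnt q (List.mem_cons_of_mem _ hq))
          (fun q hq => hagree q (List.mem_cons_of_mem _ hq))
      · have hc' : W.contains p.1 = false := by simpa using hc
        have hA : (if cnt p.1 ≥ m then (if d.contains p.1 = false then d.insert p.1 (d.size : Int) else d) else d)
            = d.insert p.1 (d.size : Int) := by
          rw [hcp, if_pos hm, hap, hc']; simp
        have hF : (decide (p.2 ≥ m) && !(W.contains p.1)) = true := by simp [hc', hm]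
        rw [hA, hF, if_pos rfl, List.map_cons]
        have hstep :
            pvInsertFresh d (p.1 :: (l.filter (fun q => decide (q.2 ≥ m) && !(W.contains q.1))).map Prod.fst)
              = pvInsertFresh (d.insert p.1 (d.size : Int)) ((l.filter (fun q => decide (q.2 ≥ m) && !(W.contains q.1))).map Prod.fst) := by
          simp [pvInsertFresh]
        rw [hstep]
        exact ih (d.insert p.1 (d.size : Int)) hndl
          (fun q hq => hcnt q (List.mem_cons_of_mem _ hq))
          (fun q hq => by
            rw [PySem.Dict.contains_insert]
            have hne : q.1 ≠ p.1 := by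
              intro h; exact hpnotin (h ▸ List.mem_map_of_mem hq)
            simp [hne, hagree q (List.mem_cons_of_mem _ hq)])
    · have hF : (decide (p.2 ≥ m) && !(W.contains p.1)) = false := by simp [hm]
      rw [if_neg (by rw [hcp]; exact hm), hF, if_neg (by simp)]
      exact ih d hndl (fun q hq => hcnt q (List.mem_cons_of_mem _ hq))
        (fun q hq => hagree q (List.mem_cons_of_mem _ hq))

-- core invariant for B: the rank-computing pass over the suffix l of items = P ++ l equals
-- pvInsertFresh, since each rank (count of qualifying predecessors) recovers the current size
theorem pv_rankFold (F : String × Int → Bool) (items : List (String × Int)) (base : Int) :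
    ∀ (l P : List (String × Int)) (d : PySem.Dict String Int),
    items = P ++ l →
    (d.size : Int) = base + ((P.filter F).length : Int) →
    (∀ p ∈ l, F p = true → d.contains p.1 = false) →
    ((l.filter F).map Prod.fst).Nodup →
    (PySem.List.enumerate l (P.length : Int)).foldl
      (fun (d : PySem.Dict String Int) (q : Int × (String × Int)) =>
        if F q.2 then
          d.insert q.2.1 (base + (((PySem.List.slice items (some 0) (some q.1)).filter F).map (fun _ => (1 : Int))).sum)
        else d) d
      = pvInsertFresh d ((l.filter F).map Prod.fst) := by
  intro l
  induction l with
  | nil => intro P d _ _ _ _; simp [pvInsertFresh, PySem.List.enumerate_nil]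
  | cons p l ih =>
    intro P d hitems hsize hfresh hnd
    rw [PySem.List.enumerate_cons]
    simp only [List.foldl_cons]
    have hslice : PySem.List.slice items (some 0) (some (P.length : Int)) = P := by
      rw [PySem.List.slice_zero_start, PySem.List.slice_to_natCast, hitems, List.take_left]
    have hrank : (((PySem.List.slice items (some 0) (some (P.length : Int))).filter F).map (fun _ => (1 : Int))).sum
        = ((P.filter F).length : Int) := by
      rw [hslice, PySem.List.sum_map_const_int]; ring
    have hPl : (P.length : Int) + 1 = (((P ++ [p]).length : Nat) : Int) := by
      simp
    have hitems' : items = (P ++ [p]) ++ l := by simpa [List.append_assoc] using hitems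
    by_cases hFp : F p = true
    · rw [List.filter_cons_of_pos hFp] at hnd ⊢
      rw [List.map_cons, List.nodup_cons] at hnd
      obtain ⟨hpnotin, hndl⟩ := hnd
      rw [if_pos hFp, hrank, ← hsize, hPl, List.map_cons]
      have hfp : d.contains p.1 = false := hfresh p (List.mem_cons_self ..) hFp
      have hstep : pvInsertFresh d (p.1 :: (l.filter F).map Prod.fst)
          = pvInsertFresh (d.insert p.1 (d.size : Int)) ((l.filter F).map Prod.fst) := by
        simp [pvInsertFresh]
      rw [hstep]
      exact ih (P ++ [p]) (d.insert p.1 (d.size : Int)) hitems'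
        (by rw [PySem.Dict.size_insert, if_neg (by simp [hfp])]
            simp [List.filter_append, List.filter_cons_of_pos hFp, hsize]
            ring)
        (fun q hq hFq => by
          rw [PySem.Dict.contains_insert]
          have hne : q.1 ≠ p.1 := by
            intro h
            exact hpnotin (h ▸ List.mem_map_of_mem (List.mem_filter.mpr ⟨hq, hFq⟩))
          simp [hne, hfresh q (List.mem_cons_of_mem _ hq) hFq])
        hndl
    · rw [List.filter_cons_of_neg (by simpa using hFp)] at hnd ⊢
      rw [if_neg hFp, hPl]
      exact ih (P ++ [p]) d hitems'
        (by simp [List.filter_append, List.filter_cons_of_neg (by simpa using hFp), hsize])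
        (fun q hq hFq => hfresh q (List.mem_cons_of_mem _ hq) hFq)
        hnd

-- ===== VERDICT (by name: the statement is the Claim_ definition above) =====
theorem get_word_id_dict_spec : Claim_equal_get_word_id_dict := by
  intro wnd wid m _ hpre
  obtain ⟨hnd, _⟩ := hpre
  unfold Spec_get_word_id_dict
  simp only [get_word_id_dict, get_word_id_dict_alt]
  have hkeys : (PySem.Dict.mk wnd).keys = wnd.map Prod.fst := by
    simp [PySem.Dict.keys]
  have hitems : (PySem.Dict.mk wnd).items = wnd := rfl
  congr 1
  simp only [pv_orig_contains, hkeys, List.foldl_map]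
  have hcore := pv_core (PySem.Dict.mk wid) m (fun w => (PySem.Dict.mk wnd).getD w 0) wnd
    (PySem.Dict.mk wid) hnd
    (fun p hp => PySem.Dict.getD_of_mem_items (d := PySem.Dict.mk wnd)
      (by simpa [hitems] using (Prod.mk.eta (p := p) ▸ hp))
      (by simpa [hkeys] using hnd) 0)
    (fun _ _ => rfl)
  rw [hcore]
  have hndnew : ((wnd.filter (fun p => decide (p.2 ≥ m) && !((PySem.Dict.mk wid).contains p.1))).map Prod.fst).Nodup :=
    hnd.sublist (List.Sublist.map Prod.fst List.filter_sublist)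
  have hrank := pv_rankFold
    (fun p : String × Int => decide (p.2 ≥ m) && !((PySem.Dict.mk wid).contains p.1))
    wnd ((PySem.Dict.mk wid).size : Int) wnd [] (PySem.Dict.mk wid)
    rfl
    (by simp)
    (fun p _ hFp => by simpa using (Bool.and_elim_right hFp))
    hndnew
  simp only [List.length_nil, Nat.cast_zero] at hrank
  rw [hrank]
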